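-- pv_equiv track=rewrite | github.com/Tammon23/CSSAdventOfCode | 2021/Day 14/Dec14_P1.py | SomeFunction
-- ===== SOURCE A (Python) =====
-- from collections import Counter
--
-- def SomeFunction(polymer_template, pair_insertions, num_steps):
--     step = 1
--     while step <= num_steps:
--         i = 0
--         while i < len(polymer_template) - 1:
--             pair = polymer_template[i]+polymer_template[i+1]
--             if pair in pair_insertions:
--                 polymer_template.insert(i+1, pair_insertions[pair])
--                 i+=2
--             else:
--                 i+=1
--         step+=1
--
--     counts = Counter(polymer_template).values()
--     return max(counts) - min(counts)
-- ===== SOURCE B (Python) =====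
-- from collections import Counter
--
-- def SomeFunction(polymer_template, pair_insertions, num_steps):
--     # Track counts of adjacent pairs per step instead of rebuilding the polymer list.
--     # (A mutates polymer_template in place; B leaves it untouched - return values agree.)
--     letters = Counter(polymer_template)
--     pairs = Counter(zip(polymer_template, polymer_template[1:]))
--     step = 0
--     while step < num_steps:
--         new_pairs = Counter()
--         for (a, b), c in pairs.items():
--             x = pair_insertions.get(a + b)
--             if x is None:
--                 new_pairs[(a, b)] += c
--             else:
--                 new_pairs[(a, x)] += c
--                 new_pairs[(x, b)] += c
--                 letters[x] += c
--         pairs = new_pairs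
--         step += 1
--     counts = letters.values()
--     return max(counts) - min(counts)
-- ===== Notes on version B (the rewrite author's own statement) =====
-- stated objective: alternative
-- what changed: B replaces A's in-place expansion of the polymer list by a per-step Counter of adjacent pairs plus a running letter counter; the polymer itself is never materialised after step 0.
import Mathlib
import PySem

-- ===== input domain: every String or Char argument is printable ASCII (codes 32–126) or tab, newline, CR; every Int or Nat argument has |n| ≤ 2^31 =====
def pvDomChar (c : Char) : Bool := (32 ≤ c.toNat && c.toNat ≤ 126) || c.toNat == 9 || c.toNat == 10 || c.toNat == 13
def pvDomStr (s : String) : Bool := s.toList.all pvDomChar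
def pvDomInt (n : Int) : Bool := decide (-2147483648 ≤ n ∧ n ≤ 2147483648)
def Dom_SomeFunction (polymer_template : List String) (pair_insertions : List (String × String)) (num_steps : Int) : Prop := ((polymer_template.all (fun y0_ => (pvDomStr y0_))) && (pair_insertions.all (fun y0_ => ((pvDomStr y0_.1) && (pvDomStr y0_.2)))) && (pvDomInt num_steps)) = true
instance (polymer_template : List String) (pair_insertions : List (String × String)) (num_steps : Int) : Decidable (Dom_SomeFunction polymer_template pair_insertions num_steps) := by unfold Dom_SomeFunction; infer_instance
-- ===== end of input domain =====

-- B replaces A's in-place expansion of the polymer list by per-step pair counting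
-- (objective: alternative). A mutates polymer_template in place; B does not —
-- the equivalence proved here is about the return value only.


-- ===== PORT A =====
-- inner while loop: walks the list with index i, inserting the looked-up element after
-- position i when the concatenated pair is a key (indices are in range under the guard,
-- so List.getD equals Python's indexing there)
def pvAInner (rules : PySem.Dict String String) (xs : List String) (i : Nat) : List String :=
  if _h : i < xs.length - 1 then
    match rules.get? (xs.getD i "" ++ xs.getD (i + 1) "") with
    | some v => pvAInner rules (PySem.List.insert xs ((i : Int) + 1) v) (i + 2)
    | none => pvAInner rules xs (i + 1)
  else xs
termination_by xs.length - i
decreasing_by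
  · rw [PySem.List.length_insert]; omega
  · omega

-- outer while loop: 'step' runs 1..num_steps, i.e. max(num_steps, 0) iterations
def pvAOuter (rules : PySem.Dict String String) (xs : List String) : Nat → List String
  | 0 => xs
  | k + 1 => pvAOuter rules (pvAInner rules xs 0) k

def SomeFunction (polymer_template : List String) (pair_insertions : List (String × String)) (num_steps : Int) : Int :=
  let rules := PySem.Dict.mk pair_insertions
  let final := pvAOuter rules polymer_template num_steps.toNat
  let counts := (PySem.Dict.counter final).values
  -- max()/min() raise on an empty polymer: excluded by Pre_, .getD 0 is the totalisation
  ((PySem.List.max? counts (fun v => v)).getD 0) - ((PySem.List.min? counts (fun v => v)).getD 0)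

-- ===== PORT B =====
-- one step: rebuild the pair counter from the current one, updating letter counts
def pvBStep (rules : PySem.Dict String String)
    (st : PySem.Dict (String × String) Int × PySem.Dict String Int) :
    PySem.Dict (String × String) Int × PySem.Dict String Int :=
  st.1.items.foldl (fun acc pc =>
    match rules.get? (pc.1.1 ++ pc.1.2) with
    | none => (acc.1.modify pc.1 0 (· + pc.2), acc.2)
    | some x => ((acc.1.modify (pc.1.1, x) 0 (· + pc.2)).modify (x, pc.1.2) 0 (· + pc.2),
                 acc.2.modify x 0 (· + pc.2)))
    (PySem.Dict.empty, st.2)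

-- the 'while step < num_steps' loop
def pvBLoop (rules : PySem.Dict String String)
    (st : PySem.Dict (String × String) Int × PySem.Dict String Int) :
    Nat → PySem.Dict (String × String) Int × PySem.Dict String Int
  | 0 => st
  | k + 1 => pvBLoop rules (pvBStep rules st) k

def SomeFunction_alt (polymer_template : List String) (pair_insertions : List (String × String)) (num_steps : Int) : Int :=
  let rules := PySem.Dict.mk pair_insertions
  let letters := PySem.Dict.counter polymer_template
  -- zip(polymer_template, polymer_template[1:])
  let pairs := PySem.Dict.counter (polymer_template.zip (PySem.List.slice polymer_template (some 1) none))
  let st := pvBLoop rules (pairs, letters) num_steps.toNat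
  let counts := st.2.values
  ((PySem.List.max? counts (fun v => v)).getD 0) - ((PySem.List.min? counts (fun v => v)).getD 0)

-- ===== PRECONDITION & SPEC =====
-- Pre_ excludes only the empty template, where both Pythons raise ValueError (max() of
-- an empty counter).
def Pre_SomeFunction (polymer_template : List String) (pair_insertions : List (String × String)) (num_steps : Int) : Prop :=
  polymer_template ≠ []
instance (polymer_template : List String) (pair_insertions : List (String × String)) (num_steps : Int) : Decidable (Pre_SomeFunction polymer_template pair_insertions num_steps) := by unfold Pre_SomeFunction; infer_instance

def pvWitness_SomeFunction : List String × (List (String × String)) × Int :=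
  (["A", "B"], [("AB", "C"), ("BC", "A")], 3)

def Spec_SomeFunction (polymer_template : List String) (pair_insertions : List (String × String)) (num_steps : Int) (out : Int) : Prop := out = SomeFunction_alt polymer_template pair_insertions num_steps
instance (polymer_template : List String) (pair_insertions : List (String × String)) (num_steps : Int) (out : Int) : Decidable (Spec_SomeFunction polymer_template pair_insertions num_steps out) := by unfold Spec_SomeFunction; infer_instance

-- ===== CLAIM (what is proved, stated in full; the proofs are below) =====
def Claim_equal_SomeFunction : Prop := ∀ (polymer_template : List String) (pair_insertions : List (String × String)) (num_steps : Int), Dom_SomeFunction polymer_template pair_insertions num_steps → Pre_SomeFunction polymer_template pair_insertions num_steps → Spec_SomeFunction polymer_template pair_insertions num_steps (SomeFunction polymer_template pair_insertions num_steps)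

-- ===== LEMMAS AND PROOFS =====

-- functional description of one expansion pass of A
def pvExpand (rules : PySem.Dict String String) : List String → List String
  | [] => []
  | [a] => [a]
  | a :: b :: t =>
    match rules.get? (a ++ b) with
    | some x => a :: x :: pvExpand rules (b :: t)
    | none => a :: pvExpand rules (b :: t)

-- adjacent pairs
def pvPairs : List String → List (String × String)
  | a :: b :: t => (a, b) :: pvPairs (b :: t)
  | _ => []

-- what one pair becomes in one step
def pvStepP (rules : PySem.Dict String String) (p : String × String) : List (String × String) :=
  match rules.get? (p.1 ++ p.2) with
  | some x => [(p.1, x), (x, p.2)]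
  | none => [p]

theorem pvExpand_small (rules : PySem.Dict String String) (xs : List String) (h : xs.length ≤ 1) :
    pvExpand rules xs = xs := by
  match xs with
  | [] => rfl
  | [a] => rfl
  | a :: b :: t => simp at h

theorem pvAInner_eq (rules : PySem.Dict String String) (xs : List String) (i : Nat) :
    pvAInner rules xs i = xs.take i ++ pvExpand rules (xs.drop i) := by
  fun_induction pvAInner rules xs i with
  | case1 xs i hlt v hv ih =>
    have h1 : i < xs.length := by omega
    have h2 : i + 1 < xs.length := by omega
    have hins : PySem.List.insert xs ((i : Int) + 1) v
        = xs.take (i + 1) ++ v :: xs.drop (i + 1) := by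
      have := PySem.List.insert_natCast xs (i + 1) v (by omega)
      push_cast at this
      exact this
    have hlen : (xs.take (i + 1)).length = i + 1 := by
      rw [List.length_take]; omega
    have htake : (PySem.List.insert xs ((i : Int) + 1) v).take (i + 2)
        = xs.take (i + 1) ++ [v] := by
      rw [hins, List.take_append, hlen]
      rw [List.take_of_length_le (by omega)]
      have h12 : i + 2 - (i + 1) = 1 := by omega
      rw [h12]
      simp
    have hdrop : (PySem.List.insert xs ((i : Int) + 1) v).drop (i + 2)
        = xs.drop (i + 1) := by
      rw [hins, List.drop_append, hlen]
      rw [List.drop_of_length_le (by rw [List.length_take]; omega)]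
      have h12 : i + 2 - (i + 1) = 1 := by omega
      rw [h12]
      rfl
    rw [ih, htake, hdrop]
    have hgi : xs.getD i "" = xs[i] := List.getD_eq_getElem xs "" h1
    have hgi1 : xs.getD (i + 1) "" = xs[i + 1] := List.getD_eq_getElem xs "" h2
    have hdi : xs.drop i = xs[i] :: xs.drop (i + 1) := List.drop_eq_getElem_cons h1
    have hdi1 : xs.drop (i + 1) = xs[i + 1] :: xs.drop (i + 2) := List.drop_eq_getElem_cons h2
    have hexp : pvExpand rules (xs.drop i) = xs[i] :: v :: pvExpand rules (xs.drop (i + 1)) := by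
      rw [hdi, hdi1, pvExpand]
      rw [hgi, hgi1] at hv
      rw [hv, ← hdi1]
    have hts : xs.take (i + 1) = xs.take i ++ [xs[i]] := by
      rw [List.take_add_one, List.getElem?_eq_getElem h1]
      rfl
    rw [hexp, hts]
    simp only [List.append_assoc, List.singleton_append, List.cons_append, List.nil_append]
  | case2 xs i hlt hv ih =>
    have h1 : i < xs.length := by omega
    have h2 : i + 1 < xs.length := by omega
    have hgi : xs.getD i "" = xs[i] := List.getD_eq_getElem xs "" h1
    have hgi1 : xs.getD (i + 1) "" = xs[i + 1] := List.getD_eq_getElem xs "" h2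
    have hdi : xs.drop i = xs[i] :: xs.drop (i + 1) := List.drop_eq_getElem_cons h1
    have hdi1 : xs.drop (i + 1) = xs[i + 1] :: xs.drop (i + 2) := List.drop_eq_getElem_cons h2
    have hexp : pvExpand rules (xs.drop i) = xs[i] :: pvExpand rules (xs.drop (i + 1)) := by
      rw [hdi, hdi1, pvExpand]
      rw [hgi, hgi1] at hv
      rw [hv, ← hdi1]
    have hts : xs.take (i + 1) = xs.take i ++ [xs[i]] := by
      rw [List.take_add_one, List.getElem?_eq_getElem h1]
      rfl
    rw [ih, hexp, hts]
    simp only [List.append_assoc, List.singleton_append]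
  | case3 xs i hge =>
    rw [pvExpand_small rules _ (by rw [List.length_drop]; omega), List.take_append_drop]

theorem pvAOuter_eq (rules : PySem.Dict String String) (xs : List String) (k : Nat) :
    pvAOuter rules xs k = (pvExpand rules)^[k] xs := by
  induction k generalizing xs with
  | zero => rfl
  | succ k ih =>
    rw [pvAOuter, ih, Function.iterate_succ_apply, pvAInner_eq]
    simp

theorem pvPairs_eq_zip (xs : List String) : pvPairs xs = xs.zip xs.tail := by
  match xs with
  | [] => rfl
  | [a] => rfl
  | a :: b :: t => rw [pvPairs, pvPairs_eq_zip (b :: t)]; rfl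

theorem pvExpand_head (rules : PySem.Dict String String) (b : String) (t : List String) :
    ∃ u, pvExpand rules (b :: t) = b :: u := by
  match t with
  | [] => exact ⟨[], rfl⟩
  | c :: t' =>
    rw [pvExpand]
    cases rules.get? (b ++ c) <;> exact ⟨_, rfl⟩

theorem pvPairs_expand (rules : PySem.Dict String String) (xs : List String) :
    pvPairs (pvExpand rules xs) = (pvPairs xs).flatMap (pvStepP rules) := by
  match xs with
  | [] => rfl
  | [a] => rfl
  | a :: b :: t =>
    have ih := pvPairs_expand rules (b :: t)
    obtain ⟨u, hu⟩ := pvExpand_head rules b t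
    rw [pvExpand, pvPairs, List.flatMap_cons]
    unfold pvStepP
    cases h : rules.get? (a ++ b) with
    | some x =>
      simp only [h]
      rw [hu, pvPairs, pvPairs, ← hu, ih]
      rfl
    | none =>
      simp only [h]
      rw [hu, pvPairs, ← hu, ih]
      rfl

theorem pvCount_expand (rules : PySem.Dict String String) (xs : List String) (e : String) :
    (pvExpand rules xs).count e =
      xs.count e + ((pvPairs xs).filterMap (fun p => rules.get? (p.1 ++ p.2))).count e := by
  match xs with
  | [] => rfl
  | [a] => simp [pvExpand, pvPairs]
  | a :: b :: t =>
    have ih := pvCount_expand rules (b :: t) e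
    rw [pvExpand, pvPairs, List.filterMap_cons]
    cases h : rules.get? (a ++ b) with
    | some x =>
      simp only [h, List.count_cons]
      rw [ih]
      simp only [List.count_cons]
      ring
    | none =>
      simp only [h, List.count_cons]
      rw [ih]
      simp only [List.count_cons]
      ring

theorem pvMem_expand (rules : PySem.Dict String String) (xs : List String) (e : String) :
    e ∈ pvExpand rules xs ↔
      e ∈ xs ∨ ∃ p ∈ pvPairs xs, rules.get? (p.1 ++ p.2) = some e := by
  rw [← List.count_pos_iff, pvCount_expand]
  constructor
  · intro h
    rcases Nat.lt_or_ge 0 (xs.count e) with h1 | h1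
    · exact Or.inl (List.count_pos_iff.mp h1)
    · right
      have : 0 < ((pvPairs xs).filterMap (fun p => rules.get? (p.1 ++ p.2))).count e := by omega
      have := List.count_pos_iff.mp this
      rcases List.mem_filterMap.mp this with ⟨p, hp, he⟩
      exact ⟨p, hp, he⟩
  · rintro (h | ⟨p, hp, he⟩)
    · have := List.count_pos_iff.mpr h; omega
    · have : e ∈ (pvPairs xs).filterMap (fun p => rules.get? (p.1 ++ p.2)) :=
        List.mem_filterMap.mpr ⟨p, hp, he⟩
      have := List.count_pos_iff.mpr this; omega

-- ===== Dict helper lemmas =====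

theorem pvMem_keys_modify {κ ν : Type} [BEq κ] [LawfulBEq κ] (d : PySem.Dict κ ν)
    (k : κ) (d0 : ν) (f : ν → ν) (q : κ) :
    q ∈ (d.modify k d0 f).keys ↔ q = k ∨ q ∈ d.keys := by
  rw [PySem.Dict.keys_modify, PySem.Dict.mem_keys_insert]

theorem pvNodup_keys_modify {κ ν : Type} [BEq κ] [LawfulBEq κ] (d : PySem.Dict κ ν)
    (k : κ) (d0 : ν) (f : ν → ν) (h : d.keys.Nodup) : (d.modify k d0 f).keys.Nodup := by
  rw [PySem.Dict.keys_modify]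
  exact PySem.Dict.nodup_keys_insert _ _ _ h

-- ===== counting sums =====

theorem pvSum_if_single {α : Type} [DecidableEq α] [BEq α] [LawfulBEq α] (keys : List α) (x : α) (w : α → Int)
    (hn : keys.Nodup) (hx : x ∈ keys) :
    (keys.map (fun k => if x = k then w k else 0)).sum = w x := by
  induction keys with
  | nil => simp at hx
  | cons k ks ih =>
    simp only [List.map_cons, List.sum_cons]
    by_cases hxk : x = k
    · rw [if_pos hxk]
      have hz : (ks.map (fun k' => if x = k' then w k' else 0)).sum = 0 := by
        apply List.sum_eq_zero
        intro y hy
        rcases List.mem_map.mp hy with ⟨k', hk', rfl⟩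
        have : x ≠ k' := fun h => (List.nodup_cons.mp hn).1 (hxk ▸ h ▸ hk')
        simp [this]
      rw [hz, hxk]; ring
    · have hxm : x ∈ ks := (List.mem_cons.mp hx).resolve_left hxk
      rw [if_neg hxk, ih (List.nodup_cons.mp hn).2 hxm]; ring

theorem pvSum_count {α : Type} [DecidableEq α] [BEq α] [LawfulBEq α] (keys : List α) (w : α → Int)
    (hn : keys.Nodup) :
    ∀ ps : List α, (∀ x ∈ ps, x ∈ keys) →
      (keys.map (fun k => w k * (ps.count k : Int))).sum = (ps.map w).sum := by
  intro ps
  induction ps with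
  | nil => simp
  | cons x ps ih =>
    intro hcov
    have h1 : ∀ k, ((x :: ps).count k : Int) = (ps.count k : Int) + (if x = k then 1 else 0) := by
      intro k
      by_cases h : x = k <;> simp [List.count_cons, h]
    have h2 : (keys.map (fun k => w k * ((x :: ps).count k : Int))).sum
        = (keys.map (fun k => w k * (ps.count k : Int) + (if x = k then w k else 0))).sum := by
      apply congrArg
      apply List.map_congr_left
      intro k _
      rw [h1 k]
      by_cases h : x = k <;> simp [h] <;> ring
    rw [h2, List.sum_map_add, ih (fun y hy => hcov y (List.mem_cons_of_mem _ hy)),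
        pvSum_if_single keys x w hn (hcov x List.mem_cons_self)]
    simp [add_comm]

theorem pvCount_flatMap {α β : Type} [BEq β] [LawfulBEq β] (l : List α) (f : α → List β) (q : β) :
    ((l.flatMap f).count q : Int) = (l.map (fun x => ((f x).count q : Int))).sum := by
  induction l with
  | nil => simp
  | cons x l ih => simp [List.flatMap_cons, List.count_append, ih]

theorem pvCount_filterMap (rules : PySem.Dict String String)
    (l : List (String × String)) (e : String) :
    ((l.filterMap (fun p => rules.get? (p.1 ++ p.2))).count e : Int)
      = (l.map (fun p => match rules.get? (p.1 ++ p.2) with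
          | some x => if x = e then (1 : Int) else 0
          | none => 0)).sum := by
  induction l with
  | nil => simp
  | cons p l ih =>
    rw [List.filterMap_cons]
    cases h : rules.get? (p.1 ++ p.2) with
    | none => simpa [h] using ih
    | some x =>
      by_cases hxe : x = e
      · subst hxe; simp [h, List.count_cons, ih]; ring
      · simp [h, List.count_cons, hxe, ih]

-- ===== the fold of pvBStep =====

-- the body of pvBStep's fold, named for the proofs
def pvF (rules : PySem.Dict String String)
    (acc : PySem.Dict (String × String) Int × PySem.Dict String Int)
    (pc : (String × String) × Int) :
    PySem.Dict (String × String) Int × PySem.Dict String Int :=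
  match rules.get? (pc.1.1 ++ pc.1.2) with
  | none => (acc.1.modify pc.1 0 (· + pc.2), acc.2)
  | some x => ((acc.1.modify (pc.1.1, x) 0 (· + pc.2)).modify (x, pc.1.2) 0 (· + pc.2),
               acc.2.modify x 0 (· + pc.2))

theorem pvBStep_eq (rules : PySem.Dict String String)
    (st : PySem.Dict (String × String) Int × PySem.Dict String Int) :
    pvBStep rules st = st.1.items.foldl (pvF rules) (PySem.Dict.empty, st.2) := rfl

-- contribution of one item to the new count of pair q / letter e
def pvG (rules : PySem.Dict String String) (q : String × String)
    (pc : (String × String) × Int) : Int :=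
  match rules.get? (pc.1.1 ++ pc.1.2) with
  | some x => (if q = (pc.1.1, x) then pc.2 else 0) + (if q = (x, pc.1.2) then pc.2 else 0)
  | none => if q = pc.1 then pc.2 else 0

def pvH (rules : PySem.Dict String String) (e : String)
    (pc : (String × String) × Int) : Int :=
  match rules.get? (pc.1.1 ++ pc.1.2) with
  | some x => if x = e then pc.2 else 0
  | none => 0

theorem pvG_eq_count (rules : PySem.Dict String String) (q : String × String)
    (pc : (String × String) × Int) :
    pvG rules q pc = ((pvStepP rules pc.1).count q : Int) * pc.2 := by
  unfold pvG pvStepP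
  cases h : rules.get? (pc.1.1 ++ pc.1.2) with
  | none =>
    simp only [List.count_cons, List.count_nil, beq_iff_eq, @eq_comm _ q]
    split_ifs <;> push_cast <;> ring
  | some x =>
    simp only [List.count_cons, List.count_nil, beq_iff_eq, @eq_comm _ q]
    split_ifs <;> push_cast <;> ring

theorem pvGetD_modify_add {κ : Type} [BEq κ] [LawfulBEq κ] [DecidableEq κ]
    (d : PySem.Dict κ Int) (k q : κ) (c : Int) :
    (d.modify k 0 (· + c)).getD q 0 = d.getD q 0 + if q = k then c else 0 := by
  rw [PySem.Dict.getD_modify]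
  split_ifs with h
  · subst h; ring
  · ring

theorem pvFold_getD_pair (rules : PySem.Dict String String)
    (L : List ((String × String) × Int)) (q : String × String) :
    ∀ acc : PySem.Dict (String × String) Int × PySem.Dict String Int,
    (L.foldl (pvF rules) acc).1.getD q 0 = acc.1.getD q 0 + (L.map (pvG rules q)).sum := by
  induction L with
  | nil => intro acc; simp
  | cons pc L ih =>
    intro acc
    rw [List.foldl_cons, ih, List.map_cons, List.sum_cons]
    have : (pvF rules acc pc).1.getD q 0 = acc.1.getD q 0 + pvG rules q pc := by
      unfold pvF pvG
      cases h : rules.get? (pc.1.1 ++ pc.1.2) with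
      | none => rw [pvGetD_modify_add]
      | some x => rw [pvGetD_modify_add, pvGetD_modify_add]; ring
    rw [this]; ring

theorem pvFold_getD_letter (rules : PySem.Dict String String)
    (L : List ((String × String) × Int)) (e : String) :
    ∀ acc : PySem.Dict (String × String) Int × PySem.Dict String Int,
    (L.foldl (pvF rules) acc).2.getD e 0 = acc.2.getD e 0 + (L.map (pvH rules e)).sum := by
  induction L with
  | nil => intro acc; simp
  | cons pc L ih =>
    intro acc
    rw [List.foldl_cons, ih, List.map_cons, List.sum_cons]
    have : (pvF rules acc pc).2.getD e 0 = acc.2.getD e 0 + pvH rules e pc := by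
      unfold pvF pvH
      cases h : rules.get? (pc.1.1 ++ pc.1.2) with
      | none => simp
      | some x =>
        simp only [PySem.Dict.getD_modify, @eq_comm _ e]
        split_ifs <;> subst_vars <;> ring
    rw [this]; ring

theorem pvFold_keys_pair (rules : PySem.Dict String String)
    (L : List ((String × String) × Int)) (q : String × String) :
    ∀ acc : PySem.Dict (String × String) Int × PySem.Dict String Int,
    (q ∈ (L.foldl (pvF rules) acc).1.keys ↔
      q ∈ acc.1.keys ∨ ∃ pc ∈ L, q ∈ pvStepP rules pc.1) := by
  induction L with
  | nil => intro acc; simp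
  | cons pc L ih =>
    intro acc
    rw [List.foldl_cons, ih]
    have : (q ∈ (pvF rules acc pc).1.keys ↔ q ∈ acc.1.keys ∨ q ∈ pvStepP rules pc.1) := by
      unfold pvF pvStepP
      cases h : rules.get? (pc.1.1 ++ pc.1.2) with
      | none => rw [pvMem_keys_modify]; simp [or_comm]
      | some x =>
        rw [pvMem_keys_modify, pvMem_keys_modify]
        simp only [List.mem_cons, List.mem_singleton, List.not_mem_nil, or_false]
        tauto
    rw [this]
    simp only [List.mem_cons]
    constructor
    · rintro ((h | h) | h)
      · exact Or.inl h
      · exact Or.inr ⟨pc, Or.inl rfl, h⟩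
      · rcases h with ⟨pc', hpc', hq⟩
        exact Or.inr ⟨pc', Or.inr hpc', hq⟩
    · rintro (h | ⟨pc', (rfl | hpc'), hq⟩)
      · exact Or.inl (Or.inl h)
      · exact Or.inl (Or.inr hq)
      · exact Or.inr ⟨pc', hpc', hq⟩

theorem pvFold_keys_letter (rules : PySem.Dict String String)
    (L : List ((String × String) × Int)) (e : String) :
    ∀ acc : PySem.Dict (String × String) Int × PySem.Dict String Int,
    (e ∈ (L.foldl (pvF rules) acc).2.keys ↔
      e ∈ acc.2.keys ∨ ∃ pc ∈ L, rules.get? (pc.1.1 ++ pc.1.2) = some e) := by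
  induction L with
  | nil => intro acc; simp
  | cons pc L ih =>
    intro acc
    rw [List.foldl_cons, ih]
    have : (e ∈ (pvF rules acc pc).2.keys ↔
        e ∈ acc.2.keys ∨ rules.get? (pc.1.1 ++ pc.1.2) = some e) := by
      unfold pvF
      cases h : rules.get? (pc.1.1 ++ pc.1.2) with
      | none => simp [h]
      | some x =>
        rw [pvMem_keys_modify]
        simp only [h, Option.some.injEq]
        constructor
        · rintro (rfl | hm)
          · exact Or.inr rfl
          · exact Or.inl hm
        · rintro (hm | rfl)
          · exact Or.inr hm
          · exact Or.inl rfl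
    rw [this]
    simp only [List.mem_cons]
    constructor
    · rintro ((h | h) | h)
      · exact Or.inl h
      · exact Or.inr ⟨pc, Or.inl rfl, h⟩
      · rcases h with ⟨pc', hpc', hq⟩
        exact Or.inr ⟨pc', Or.inr hpc', hq⟩
    · rintro (h | ⟨pc', (rfl | hpc'), hq⟩)
      · exact Or.inl (Or.inl h)
      · exact Or.inl (Or.inr hq)
      · exact Or.inr ⟨pc', hpc', hq⟩

theorem pvFold_nodup (rules : PySem.Dict String String)
    (L : List ((String × String) × Int)) :
    ∀ acc : PySem.Dict (String × String) Int × PySem.Dict String Int,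
    acc.1.keys.Nodup → acc.2.keys.Nodup →
    (L.foldl (pvF rules) acc).1.keys.Nodup ∧ (L.foldl (pvF rules) acc).2.keys.Nodup := by
  induction L with
  | nil => intro acc h1 h2; exact ⟨h1, h2⟩
  | cons pc L ih =>
    intro acc h1 h2
    rw [List.foldl_cons]
    apply ih
    · unfold pvF
      cases rules.get? (pc.1.1 ++ pc.1.2) with
      | none => exact pvNodup_keys_modify _ _ _ _ h1
      | some x => exact pvNodup_keys_modify _ _ _ _ (pvNodup_keys_modify _ _ _ _ h1)
    · unfold pvF
      cases rules.get? (pc.1.1 ++ pc.1.2) with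
      | none => exact h2
      | some x => exact pvNodup_keys_modify _ _ _ _ h2

-- ===== the invariant =====

def pvInv (rules : PySem.Dict String String) (lf : List String)
    (st : PySem.Dict (String × String) Int × PySem.Dict String Int) : Prop :=
  (∀ q, st.1.getD q 0 = ((pvPairs lf).count q : Int)) ∧
  st.1.keys.Nodup ∧
  (∀ q, q ∈ st.1.keys ↔ q ∈ pvPairs lf) ∧
  (∀ e, st.2.getD e 0 = (lf.count e : Int)) ∧
  st.2.keys.Nodup ∧
  (∀ e, e ∈ st.2.keys ↔ e ∈ lf)

theorem pvH_eq (rules : PySem.Dict String String) (e : String)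
    (pc : (String × String) × Int) :
    pvH rules e pc = (match rules.get? (pc.1.1 ++ pc.1.2) with
      | some x => if x = e then (1 : Int) else 0
      | none => 0) * pc.2 := by
  unfold pvH
  cases h : rules.get? (pc.1.1 ++ pc.1.2) with
  | none => simp
  | some x => by_cases hxe : x = e <;> simp [hxe]

theorem pvItems_iff (rules : PySem.Dict String String) (lf : List String)
    (st : PySem.Dict (String × String) Int × PySem.Dict String Int)
    (hn1 : st.1.keys.Nodup) (hk1 : ∀ q, q ∈ st.1.keys ↔ q ∈ pvPairs lf)
    (P : (String × String) → Prop) :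
    (∃ pc ∈ st.1.items, P pc.1) ↔ (∃ p ∈ pvPairs lf, P p) := by
  constructor
  · rintro ⟨pc, hpc, hP⟩
    have : pc.1 ∈ st.1.keys := PySem.Dict.mem_keys_of_mem_items _ hpc
    exact ⟨pc.1, (hk1 pc.1).mp this, hP⟩
  · rintro ⟨p, hp, hP⟩
    have hpk : p ∈ st.1.keys := (hk1 p).mpr hp
    have hit := PySem.Dict.items_eq_map_keys st.1 hn1 0
    refine ⟨(p, st.1.getD p 0), ?_, hP⟩
    rw [hit]
    exact List.mem_map.mpr ⟨p, hpk, rfl⟩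

theorem pvInv_step (rules : PySem.Dict String String) (lf : List String)
    (st : PySem.Dict (String × String) Int × PySem.Dict String Int)
    (h : pvInv rules lf st) : pvInv rules (pvExpand rules lf) (pvBStep rules st) := by
  obtain ⟨hv1, hn1, hk1, hv2, hn2, hk2⟩ := h
  have hit := PySem.Dict.items_eq_map_keys st.1 hn1 0
  refine ⟨?_, ?_, ?_, ?_, ?_, ?_⟩
  · -- pair counts
    intro q
    rw [pvBStep_eq, pvFold_getD_pair, PySem.Dict.getD_empty]
    have hmap : st.1.items.map (pvG rules q)
        = st.1.keys.map (fun k => (((pvStepP rules k).count q : Int))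
            * ((pvPairs lf).count k : Int)) := by
      rw [hit, List.map_map]
      apply List.map_congr_left
      intro k _
      show pvG rules q (k, st.1.getD k 0) = _
      rw [pvG_eq_count, hv1 k]
    rw [hmap, pvSum_count st.1.keys _ hn1 (pvPairs lf) (fun x hx => (hk1 x).mpr hx),
        pvPairs_expand, pvCount_flatMap]
    ring
  · -- pair nodup
    rw [pvBStep_eq]
    have hne : (PySem.Dict.empty : PySem.Dict (String × String) Int).keys.Nodup := by
      rw [PySem.Dict.keys_empty]; exact List.nodup_nil
    exact (pvFold_nodup rules st.1.items (PySem.Dict.empty, st.2) hne hn2).1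
  · -- pair keys
    intro q
    rw [pvBStep_eq, pvFold_keys_pair, pvPairs_expand, List.mem_flatMap]
    rw [pvItems_iff rules lf st hn1 hk1 (fun p => q ∈ pvStepP rules p)]
    simp [PySem.Dict.keys_empty]
  · -- letter counts
    intro e
    rw [pvBStep_eq, pvFold_getD_letter, hv2, pvCount_expand]
    have hmap : st.1.items.map (pvH rules e)
        = st.1.keys.map (fun k => ((match rules.get? (k.1 ++ k.2) with
            | some x => if x = e then (1 : Int) else 0
            | none => 0)) * ((pvPairs lf).count k : Int)) := by
      rw [hit, List.map_map]
      apply List.map_congr_left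
      intro k _
      show pvH rules e (k, st.1.getD k 0) = _
      rw [pvH_eq, hv1 k]
    rw [hmap, pvSum_count st.1.keys _ hn1 (pvPairs lf) (fun x hx => (hk1 x).mpr hx),
        ← pvCount_filterMap]
    push_cast
    ring
  · -- letter nodup
    rw [pvBStep_eq]
    have hne : (PySem.Dict.empty : PySem.Dict (String × String) Int).keys.Nodup := by
      rw [PySem.Dict.keys_empty]; exact List.nodup_nil
    exact (pvFold_nodup rules st.1.items (PySem.Dict.empty, st.2) hne hn2).2
  · -- letter keys
    intro e
    rw [pvBStep_eq, pvFold_keys_letter, pvMem_expand]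
    rw [pvItems_iff rules lf st hn1 hk1 (fun p => rules.get? (p.1 ++ p.2) = some e)]
    rw [hk2]

theorem pvInv_loop (rules : PySem.Dict String String) (k : Nat) :
    ∀ (lf : List String) (st : PySem.Dict (String × String) Int × PySem.Dict String Int),
    pvInv rules lf st → pvInv rules ((pvExpand rules)^[k] lf) (pvBLoop rules st k) := by
  induction k with
  | zero => intro lf st h; exact h
  | succ k ih =>
    intro lf st h
    rw [pvBLoop, Function.iterate_succ_apply]
    exact ih _ _ (pvInv_step rules lf st h)

theorem pvInv_init (rules : PySem.Dict String String) (xs : List String) :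
    pvInv rules xs (PySem.Dict.counter (xs.zip (PySem.List.slice xs (some 1) none)),
                    PySem.Dict.counter xs) := by
  rw [PySem.List.slice_from_one]
  refine ⟨?_, PySem.Dict.nodup_keys_counter _, ?_, ?_, PySem.Dict.nodup_keys_counter _, ?_⟩
  · intro q
    show (PySem.Dict.counter (xs.zip xs.tail)).getD q 0 = _
    rw [PySem.Dict.getD_counter, pvPairs_eq_zip]
  · intro q
    show q ∈ (PySem.Dict.counter (xs.zip xs.tail)).keys ↔ _
    rw [PySem.Dict.keys_counter, PySem.Set.mem_ofList, pvPairs_eq_zip]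
  · intro e
    show (PySem.Dict.counter xs).getD e 0 = _
    rw [PySem.Dict.getD_counter]
  · intro e
    show e ∈ (PySem.Dict.counter xs).keys ↔ _
    rw [PySem.Dict.keys_counter, PySem.Set.mem_ofList]

-- ===== permutation invariance of max/min =====

theorem pvMax?_perm (l l' : List Int) (h : l.Perm l') :
    PySem.List.max? l (fun v => v) = PySem.List.max? l' (fun v => v) := by
  cases hl : PySem.List.max? l (fun v => v) with
  | none =>
    rw [PySem.List.max?_eq_none_iff] at hl
    subst hl
    rw [(PySem.List.max?_eq_none_iff _ _).mpr (List.Perm.eq_nil h.symm)]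
  | some m =>
    cases hl' : PySem.List.max? l' (fun v => v) with
    | none =>
      rw [PySem.List.max?_eq_none_iff] at hl'
      subst hl'
      rw [(PySem.List.max?_eq_none_iff _ _).mpr (List.Perm.eq_nil h)] at hl
      simp at hl
    | some m' =>
      have hm := PySem.List.max?_mem hl
      have hm' := PySem.List.max?_mem hl'
      have h1 := PySem.List.max?_isMax hl m' (h.symm.mem_iff.mp hm')
      have h2 := PySem.List.max?_isMax hl' m (h.mem_iff.mp hm)
      simp only [Option.some.injEq]
      omega

theorem pvMin?_perm (l l' : List Int) (h : l.Perm l') :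
    PySem.List.min? l (fun v => v) = PySem.List.min? l' (fun v => v) := by
  cases hl : PySem.List.min? l (fun v => v) with
  | none =>
    rw [PySem.List.min?_eq_none_iff] at hl
    subst hl
    rw [(PySem.List.min?_eq_none_iff _ _).mpr (List.Perm.eq_nil h.symm)]
  | some m =>
    cases hl' : PySem.List.min? l' (fun v => v) with
    | none =>
      rw [PySem.List.min?_eq_none_iff] at hl'
      subst hl'
      rw [(PySem.List.min?_eq_none_iff _ _).mpr (List.Perm.eq_nil h)] at hl
      simp at hl
    | some m' =>
      have hm := PySem.List.min?_mem hl
      have hm' := PySem.List.min?_mem hl'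
      have h1 := PySem.List.min?_isMin hl m' (h.symm.mem_iff.mp hm')
      have h2 := PySem.List.min?_isMin hl' m (h.mem_iff.mp hm)
      simp only [Option.some.injEq]
      omega

-- ===== VERDICT (by name: the statement is the Claim_ definition above) =====
theorem SomeFunction_spec : Claim_equal_SomeFunction := by
  intro pt pi ns _dom _pre
  unfold Spec_SomeFunction SomeFunction SomeFunction_alt
  simp only []
  have hA : pvAOuter (PySem.Dict.mk pi) pt ns.toNat
      = (pvExpand (PySem.Dict.mk pi))^[ns.toNat] pt := pvAOuter_eq _ _ _
  have hInv := pvInv_loop (PySem.Dict.mk pi) ns.toNat pt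
      (PySem.Dict.counter (pt.zip (PySem.List.slice pt (some 1) none)), PySem.Dict.counter pt)
      (pvInv_init (PySem.Dict.mk pi) pt)
  obtain ⟨hv1, hn1, hk1, hv2, hn2, hk2⟩ := hInv
  set rules := PySem.Dict.mk pi with hrules
  set lf := (pvExpand rules)^[ns.toNat] pt with hlf
  set st := pvBLoop rules
      (PySem.Dict.counter (pt.zip (PySem.List.slice pt (some 1) none)), PySem.Dict.counter pt)
      ns.toNat with hst
  have hperm_keys : st.2.keys.Perm (PySem.Set.ofList lf) :=
    (List.perm_ext_iff_of_nodup hn2 (PySem.Set.nodup_ofList lf)).mpr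
      (fun a => by rw [hk2, PySem.Set.mem_ofList])
  have hvals2 : st.2.values = st.2.keys.map (fun k => (lf.count k : Int)) := by
    rw [PySem.Dict.values_eq_map_keys st.2 hn2 0]
    exact List.map_congr_left (fun k _ => hv2 k)
  have hcvals : (PySem.Dict.counter lf).values
      = (PySem.Set.ofList lf).map (fun k => (lf.count k : Int)) := by
    rw [PySem.Dict.values_eq_map_keys _ (PySem.Dict.nodup_keys_counter lf) 0,
        PySem.Dict.keys_counter]
    exact List.map_congr_left (fun k _ => PySem.Dict.getD_counter lf k)
  have hperm : (PySem.Dict.counter lf).values.Perm st.2.values := by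
    rw [hvals2, hcvals]
    exact (hperm_keys.map _).symm
  rw [hA]
  rw [pvMax?_perm _ _ hperm, pvMin?_perm _ _ hperm]
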